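-- pv_equiv track=rewrite | github.com/ericklaus16/aurem | conversor_ll1.py | prune_unreachable
-- ===== SOURCE A (Python) =====
-- from collections import OrderedDict
--
-- def prune_unreachable(grammar, start_symbol):
--     reachable = set()
--     work = [start_symbol]
--     while work:
--         A = work.pop()
--         if A in reachable or A not in grammar:
--             continue
--         reachable.add(A)
--         for prods in grammar.get(A, []):
--             for s in prods:
--                 if s in grammar and s not in reachable:
--                     work.append(s)
--     # Reconstroi seguindo a ordem do grammar original
--     pruned = OrderedDict()
--     for A in grammar.keys():
--         if A in reachable:
--             pruned[A] = grammar[A]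
--     return pruned
-- ===== SOURCE B (Python) =====
-- from collections import OrderedDict
--
-- def prune_unreachable(grammar, start_symbol):
--     # Round-based saturation instead of an explicit worklist stack:
--     # repeatedly sweep the current reachable set and add every grammar
--     # symbol referenced by it, until a full sweep adds nothing.
--     reachable = {start_symbol} if start_symbol in grammar else set()
--     changed = True
--     while changed:
--         changed = False
--         for A in list(reachable):
--             for prod in grammar[A]:
--                 for s in prod:
--                     if s in grammar and s not in reachable:
--                         reachable.add(s)
--                         changed = True
--     pruned = OrderedDict()
--     for A in grammar:
--         if A in reachable:
--             pruned[A] = grammar[A]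
--     return pruned
-- ===== Notes on version B (the rewrite author's own statement) =====
-- stated objective: alternative
-- what changed: Replaces A's explicit LIFO worklist traversal by round-based fixpoint saturation: the reachable set is repeatedly swept and enlarged with every grammar symbol it references until a full sweep adds nothing.
import Mathlib
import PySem

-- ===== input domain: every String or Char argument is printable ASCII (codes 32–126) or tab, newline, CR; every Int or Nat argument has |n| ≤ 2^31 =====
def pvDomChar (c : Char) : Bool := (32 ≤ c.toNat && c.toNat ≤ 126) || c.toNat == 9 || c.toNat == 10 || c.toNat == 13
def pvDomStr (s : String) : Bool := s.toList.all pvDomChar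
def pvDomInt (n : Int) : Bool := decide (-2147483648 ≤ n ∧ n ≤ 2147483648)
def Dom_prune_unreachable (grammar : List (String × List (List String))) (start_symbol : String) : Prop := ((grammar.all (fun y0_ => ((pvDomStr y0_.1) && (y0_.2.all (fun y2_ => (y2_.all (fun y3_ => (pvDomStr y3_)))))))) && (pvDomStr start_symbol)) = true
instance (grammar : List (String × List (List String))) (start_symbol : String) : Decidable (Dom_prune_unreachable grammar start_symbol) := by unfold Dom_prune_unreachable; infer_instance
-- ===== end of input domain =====

-- B replaces A's explicit LIFO worklist traversal by round-based fixpoint saturation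
-- (sweep the reachable set until a full sweep adds nothing); same return value, objective: alternative.

-- ===== PORT A =====
-- shared dict primitives: 'A in grammar' / grammar.get(A, []) on the association list (lookup = first match)
def gLook : List (String × List (List String)) → String → Option (List (List String))
  | [], _ => none
  | (k, v) :: rest, A => if k == A then some v else gLook rest A

def gMem (g : List (String × List (List String))) (A : String) : Bool := (gLook g A).isSome

-- the reconstruction loop ('pruned = OrderedDict(); for A in grammar: …') is verbatim identical
-- in both Pythons, so both ports call this one transliteration of it
def rebuild (g : List (String × List (List String))) (reachable : PySem.Set String) : List (String × List (List String)) :=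
  (PySem.List.dedup (g.map Prod.fst)).foldl
    (fun pruned A => if PySem.Set.contains reachable A then pruned ++ [(A, (gLook g A).getD [])] else pruned) []

-- termination helpers for the two loops (cited by decreasing_by)
theorem pvMemKeys (g : List (String × List (List String))) (A : String)
    (h : gMem g A = true) : A ∈ g.map Prod.fst := by
  unfold gMem at h
  rw [Option.isSome_iff_exists] at h
  obtain ⟨v, hv⟩ := h
  induction g with
  | nil => simp [gLook] at hv
  | cons p rest ih =>
    obtain ⟨k, w⟩ := p
    simp only [gLook] at hv
    by_cases hk : (k == A) = true
    · simp only [beq_iff_eq] at hk; simp [hk]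
    · simp only [hk, if_false] at hv; simp [ih hv]

theorem pvFilterMono (p q : String → Bool) (h : ∀ x, q x = true → p x = true) (l : List String) :
    (l.filter q).length ≤ (l.filter p).length := by
  induction l with
  | nil => simp
  | cons a l ih =>
    by_cases hq : q a = true
    · simp only [List.filter_cons, hq, h a hq, if_true, List.length_cons]; omega
    · cases hp : p a <;> simp [List.filter_cons, hq, hp] <;> omega

theorem pvCountLt (l : List String) (r r' : List String) (A : String)
    (hsub : ∀ x, x ∈ r → x ∈ r') (hA : A ∈ r') (hAn : A ∉ r) (hk : A ∈ l) :
    (l.filter (fun k => !decide (k ∈ r'))).length <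
      (l.filter (fun k => !decide (k ∈ r))).length := by
  have hmono : ∀ x : String, (!decide (x ∈ r')) = true → (!decide (x ∈ r)) = true := by
    intro x hx
    simp only [Bool.not_eq_true', decide_eq_false_iff_not] at *
    exact fun hc => hx (hsub x hc)
  induction l with
  | nil => cases hk
  | cons a l ih =>
    rcases List.mem_cons.mp hk with rfl | hmem
    · have hle := pvFilterMono _ _ hmono l
      simp [List.filter_cons, hA, hAn]
      omega
    · have h := ih hmem
      cases hq : (!decide (a ∈ r'))
      · cases hp : (!decide (a ∈ r)) <;>
          simp [List.filter_cons, hq, hp] <;> omega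
      · have hp := hmono a hq
        simp [List.filter_cons, hq, hp]; omega

-- while work: A = work.pop(); …  (stack: Lean list with head = top, push = cons — same LIFO order)
def loopA (g : List (String × List (List String))) (reachable : PySem.Set String) (work : List String) : PySem.Set String :=
  match work with
  | [] => reachable
  | A :: rest =>
    if PySem.Set.contains reachable A || !gMem g A then loopA g reachable rest
    else
      let r' := PySem.Set.add reachable A
      let work' := ((gLook g A).getD []).foldl
        (fun w prods => prods.foldl
          (fun w s => if gMem g s && !PySem.Set.contains r' s then s :: w else w) w) rest
      loopA g r' work'
  termination_by (((g.map Prod.fst).filter (fun k => !PySem.Set.contains reachable k)).length, work.length)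
  decreasing_by
  · apply Prod.Lex.right
    simp
  · apply Prod.Lex.left
    rename_i hcond
    simp only [Bool.or_eq_true, Bool.not_eq_true'] at hcond
    push_neg at hcond
    obtain ⟨hnc, hmemA⟩ := hcond
    simp only [PySem.Set.contains_eq_listContains, List.contains_eq_mem]
    apply pvCountLt
    · intro x hx
      rw [PySem.Set.mem_add]; exact Or.inl hx
    · rw [PySem.Set.mem_add]; exact Or.inr rfl
    · exact fun hc => hnc ((PySem.Set.contains_iff reachable A).mpr hc)
    · apply pvMemKeys
      cases hg : gMem g A
      · exact absurd hg hmemA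
      · rfl

def prune_unreachable (grammar : List (String × List (List String))) (start_symbol : String) : List (String × List (List String)) :=
  let reachable := loopA grammar (PySem.Set.ofList []) [start_symbol]
  rebuild grammar reachable

-- ===== PORT B =====
-- inner 'for s in prod: if s in grammar and s not in reachable: reachable.add(s); changed = True'
def stepSym (g : List (String × List (List String))) (st : PySem.Set String × Bool) (s : String) : PySem.Set String × Bool :=
  if gMem g s && !PySem.Set.contains st.1 s then (PySem.Set.add st.1 s, true) else st

-- 'for prod in grammar[A]: for s in prod: …'
def stepKey (g : List (String × List (List String))) (st : PySem.Set String × Bool) (A : String) : PySem.Set String × Bool :=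
  ((gLook g A).getD []).foldl (fun st prod => prod.foldl (stepSym g) st) st

-- one sweep 'changed = False; for A in list(reachable): …' (the resulting set and flag do not
-- depend on Python's set iteration order: a sweep adds exactly the referenced grammar keys not yet present)
def sweep (g : List (String × List (List String))) (r : PySem.Set String) : PySem.Set String × Bool :=
  r.foldl (stepKey g) (r, false)

-- generic facts about folds over (set, changed) states, needed by loopB's termination (cited by decreasing_by)
theorem pvFoldMono {α : Type} (f : (PySem.Set String × Bool) → α → (PySem.Set String × Bool))
    (hf : ∀ st a, ∀ x ∈ st.1, x ∈ (f st a).1) (l : List α)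
    (st : PySem.Set String × Bool) : ∀ x ∈ st.1, x ∈ (l.foldl f st).1 := by
  induction l generalizing st with
  | nil => intro x hx; simpa using hx
  | cons a l ih => intro x hx; exact ih (f st a) x (hf st a x hx)

theorem pvFoldNew {α : Type} (g : List (String × List (List String)))
    (f : (PySem.Set String × Bool) → α → (PySem.Set String × Bool))
    (hmono : ∀ st a, ∀ x ∈ st.1, x ∈ (f st a).1)
    (hnew : ∀ st a, st.2 = false → (f st a).2 = true →
      ∃ k, gMem g k = true ∧ k ∈ (f st a).1 ∧ k ∉ st.1)
    (l : List α) (st : PySem.Set String × Bool) (h0 : st.2 = false)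
    (h : (l.foldl f st).2 = true) :
    ∃ k, gMem g k = true ∧ k ∈ (l.foldl f st).1 ∧ k ∉ st.1 := by
  induction l generalizing st with
  | nil => rw [List.foldl_nil] at h; rw [h0] at h; cases h
  | cons a l ih =>
    rw [List.foldl_cons] at h ⊢
    by_cases h2 : (f st a).2 = true
    · obtain ⟨k, hk1, hk2, hk3⟩ := hnew st a h0 h2
      exact ⟨k, hk1, pvFoldMono f hmono l (f st a) k hk2, hk3⟩
    · obtain ⟨k, hk1, hk2, hk3⟩ := ih (f st a) (by simpa using h2) h
      exact ⟨k, hk1, hk2, fun hc => hk3 (hmono st a k hc)⟩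

theorem pvStepSymMono (g : List (String × List (List String))) :
    ∀ (st : PySem.Set String × Bool) (s : String), ∀ x ∈ st.1, x ∈ (stepSym g st s).1 := by
  intro st s x hx
  unfold stepSym
  split
  · rw [PySem.Set.mem_add]; exact Or.inl hx
  · exact hx

theorem pvStepSymNew (g : List (String × List (List String))) :
    ∀ (st : PySem.Set String × Bool) (s : String), st.2 = false → (stepSym g st s).2 = true →
      ∃ k, gMem g k = true ∧ k ∈ (stepSym g st s).1 ∧ k ∉ st.1 := by
  intro st s h0 h1
  unfold stepSym at h1 ⊢
  by_cases hcond : (gMem g s && !PySem.Set.contains st.1 s) = true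
  · rw [if_pos hcond]
    have hc2 := hcond
    simp only [Bool.and_eq_true, Bool.not_eq_true'] at hc2
    refine ⟨s, hc2.1, ?_, ?_⟩
    · show s ∈ PySem.Set.add st.1 s
      rw [PySem.Set.mem_add]; exact Or.inr rfl
    · intro hc
      have h3 := hc2.2
      rw [(PySem.Set.contains_iff st.1 s).mpr hc] at h3
      simp at h3
  · rw [if_neg hcond] at h1
    rw [h0] at h1
    cases h1

theorem pvStepProdMono (g : List (String × List (List String))) :
    ∀ (st : PySem.Set String × Bool) (prod : List String), ∀ x ∈ st.1,
      x ∈ (prod.foldl (stepSym g) st).1 :=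
  fun st prod => pvFoldMono (stepSym g) (pvStepSymMono g) prod st

theorem pvStepProdNew (g : List (String × List (List String))) :
    ∀ (st : PySem.Set String × Bool) (prod : List String), st.2 = false →
      (prod.foldl (stepSym g) st).2 = true →
      ∃ k, gMem g k = true ∧ k ∈ (prod.foldl (stepSym g) st).1 ∧ k ∉ st.1 :=
  fun st prod => pvFoldNew g (stepSym g) (pvStepSymMono g) (pvStepSymNew g) prod st

theorem pvStepKeyMono (g : List (String × List (List String))) :
    ∀ (st : PySem.Set String × Bool) (A : String), ∀ x ∈ st.1, x ∈ (stepKey g st A).1 :=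
  fun st A => pvFoldMono _ (pvStepProdMono g) ((gLook g A).getD []) st

theorem pvStepKeyNew (g : List (String × List (List String))) :
    ∀ (st : PySem.Set String × Bool) (A : String), st.2 = false → (stepKey g st A).2 = true →
      ∃ k, gMem g k = true ∧ k ∈ (stepKey g st A).1 ∧ k ∉ st.1 :=
  fun st A => pvFoldNew g _ (pvStepProdMono g) (pvStepProdNew g) ((gLook g A).getD []) st

theorem pvSweepMono (g : List (String × List (List String))) (r : PySem.Set String) :
    ∀ x ∈ r, x ∈ (sweep g r).1 :=
  fun x hx => pvFoldMono (stepKey g) (pvStepKeyMono g) r (r, false) x hx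

theorem pvSweepNew (g : List (String × List (List String))) (r : PySem.Set String)
    (h : (sweep g r).2 = true) :
    ∃ k, gMem g k = true ∧ k ∈ (sweep g r).1 ∧ k ∉ r :=
  pvFoldNew g (stepKey g) (pvStepKeyMono g) (pvStepKeyNew g) r (r, false) rfl h

def loopB (g : List (String × List (List String))) (r : PySem.Set String) : PySem.Set String :=
  let st := sweep g r
  if st.2 = true then loopB g st.1 else st.1
  termination_by ((g.map Prod.fst).filter (fun k => !PySem.Set.contains r k)).length
  decreasing_by
  · rename_i h
    obtain ⟨k, hk1, hk2, hk3⟩ := pvSweepNew g r h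
    simp only [PySem.Set.contains_eq_listContains, List.contains_eq_mem]
    exact pvCountLt _ _ _ k (pvSweepMono g r) hk2 hk3 (pvMemKeys g k hk1)

def prune_unreachable_alt (grammar : List (String × List (List String))) (start_symbol : String) : List (String × List (List String)) :=
  let r0 := if gMem grammar start_symbol then PySem.Set.ofList [start_symbol] else PySem.Set.ofList []
  let reachable := loopB grammar r0
  rebuild grammar reachable

-- ===== PRECONDITION & SPEC =====
def Spec_prune_unreachable (grammar : List (String × List (List String))) (start_symbol : String) (out : List (String × List (List String))) : Prop := out = prune_unreachable_alt grammar start_symbol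
instance (grammar : List (String × List (List String))) (start_symbol : String) (out : List (String × List (List String))) : Decidable (Spec_prune_unreachable grammar start_symbol out) := by unfold Spec_prune_unreachable; infer_instance

-- ===== CLAIM (what is proved, stated in full; the proofs are below) =====
def Claim_equal_prune_unreachable : Prop := ∀ (grammar : List (String × List (List String))) (start_symbol : String), Dom_prune_unreachable grammar start_symbol → Spec_prune_unreachable grammar start_symbol (prune_unreachable grammar start_symbol)

-- ===== LEMMAS AND PROOFS =====

theorem pvFoldFlag {α : Type} (f : (PySem.Set String × Bool) → α → (PySem.Set String × Bool))
    (hf : ∀ st a, st.2 = true → (f st a).2 = true) (l : List α)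
    (st : PySem.Set String × Bool) (h : st.2 = true) : (l.foldl f st).2 = true := by
  induction l generalizing st with
  | nil => simpa using h
  | cons a l ih => exact ih (f st a) (hf st a h)


theorem pvStepSymFlag (g : List (String × List (List String))) :
    ∀ (st : PySem.Set String × Bool) (s : String), st.2 = true → (stepSym g st s).2 = true := by
  intro st s h
  unfold stepSym
  split
  · rfl
  · exact h


theorem pvStepProdFlag (g : List (String × List (List String))) :
    ∀ (st : PySem.Set String × Bool) (prod : List String), st.2 = true →
      (prod.foldl (stepSym g) st).2 = true :=
  fun st prod => pvFoldFlag (stepSym g) (pvStepSymFlag g) prod st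


theorem pvStepKeyFlag (g : List (String × List (List String))) :
    ∀ (st : PySem.Set String × Bool) (A : String), st.2 = true → (stepKey g st A).2 = true :=
  fun st A => pvFoldFlag _ (pvStepProdFlag g) ((gLook g A).getD []) st


-- the reachability relation both loops compute: symbols of grammar reachable from the start symbol
inductive Reach (g : List (String × List (List String))) (start : String) : String → Prop
  | start : gMem g start = true → Reach g start start
  | step {A s : String} : Reach g start A → s ∈ ((gLook g A).getD []).flatten →
      gMem g s = true → Reach g start s

-- membership in A's worklist after pushing the fresh symbols of a popped key
theorem pvMemPush1 (c : String → Bool) (l : List String) (w : List String) (x : String) :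
    x ∈ l.foldl (fun w s => if c s then s :: w else w) w ↔ x ∈ w ∨ (x ∈ l ∧ c x = true) := by
  induction l generalizing w with
  | nil => simp
  | cons s l ih =>
    rw [List.foldl_cons, ih]
    by_cases hc : c s = true
    · simp only [if_pos hc, List.mem_cons]
      constructor
      · rintro ((rfl | h) | ⟨h1, h2⟩)
        · exact Or.inr ⟨Or.inl rfl, hc⟩
        · exact Or.inl h
        · exact Or.inr ⟨Or.inr h1, h2⟩
      · rintro (h | ⟨(rfl | h1), h2⟩)
        · exact Or.inl (Or.inr h)
        · exact Or.inl (Or.inl rfl)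
        · exact Or.inr ⟨h1, h2⟩
    · simp only [if_neg hc, List.mem_cons]
      constructor
      · rintro (h | ⟨h1, h2⟩)
        · exact Or.inl h
        · exact Or.inr ⟨Or.inr h1, h2⟩
      · rintro (h | ⟨(rfl | h1), h2⟩)
        · exact Or.inl h
        · exact absurd h2 hc
        · exact Or.inr ⟨h1, h2⟩

theorem pvMemPush (c : String → Bool) (prods : List (List String)) (w : List String) (x : String) :
    x ∈ prods.foldl (fun w prod => prod.foldl (fun w s => if c s then s :: w else w) w) w ↔
      x ∈ w ∨ (x ∈ prods.flatten ∧ c x = true) := by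
  induction prods generalizing w with
  | nil => simp
  | cons prod prods ih =>
    rw [List.foldl_cons, ih, pvMemPush1]
    simp only [List.flatten_cons, List.mem_append]
    tauto

-- the invariant of A's worklist loop
theorem loopA_spec (g : List (String × List (List String))) (start : String) :
    ∀ (r : PySem.Set String) (w : List String),
    (∀ x ∈ r, Reach g start x) →
    (∀ x ∈ w, gMem g x = true → Reach g start x) →
    (∀ A ∈ r, ∀ s ∈ ((gLook g A).getD []).flatten, gMem g s = true → s ∈ r ∨ s ∈ w) →
    (gMem g start = true → start ∈ r ∨ start ∈ w) →
    (∀ x ∈ loopA g r w, Reach g start x) ∧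
    (∀ A ∈ loopA g r w, ∀ s ∈ ((gLook g A).getD []).flatten, gMem g s = true → s ∈ loopA g r w) ∧
    (gMem g start = true → start ∈ loopA g r w) ∧
    (∀ x ∈ r, x ∈ loopA g r w) := by
  intro r w
  induction r, w using loopA.induct g with
  | case1 r =>
    intro h1 h2 h3 h4
    rw [loopA]
    refine ⟨h1, ?_, ?_, fun x hx => hx⟩
    · intro A hA s hs hg
      rcases h3 A hA s hs hg with h | h
      · exact h
      · cases h
    · intro hg
      rcases h4 hg with h | h
      · exact h
      · cases h
  | case2 r A rest hcond ih =>
    intro h1 h2 h3 h4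
    have hcond' : PySem.Set.contains r A = true ∨ gMem g A = false := by
      rcases Bool.or_eq_true _ _ |>.mp hcond with h | h
      · exact Or.inl h
      · exact Or.inr (Bool.not_eq_true' _ |>.mp h)
    have heq : loopA g r (A :: rest) = loopA g r rest := by
      rw [loopA]
      simp only [hcond, if_true]
    rw [heq]
    apply ih h1
    · exact fun x hx hg => h2 x (List.mem_cons_of_mem _ hx) hg
    · intro A' hA' s hs hg
      rcases h3 A' hA' s hs hg with h | h
      · exact Or.inl h
      · rcases List.mem_cons.mp h with rfl | h
        · rcases hcond' with hc | hc
          · exact Or.inl ((PySem.Set.contains_iff r s).mp hc)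
          · rw [hg] at hc; cases hc
        · exact Or.inr h
    · intro hg
      rcases h4 hg with h | h
      · exact Or.inl h
      · rcases List.mem_cons.mp h with rfl | h
        · rcases hcond' with hc | hc
          · exact Or.inl ((PySem.Set.contains_iff r start).mp hc)
          · rw [hg] at hc; cases hc
        · exact Or.inr h
  | case3 r A rest hcond r' work' ih =>
    intro h1 h2 h3 h4
    have hcond' : PySem.Set.contains r A = false ∧ gMem g A = true := by
      have hfalse : (PySem.Set.contains r A || !gMem g A) = false := Bool.eq_false_iff.mpr hcond
      constructor
      · cases hc : PySem.Set.contains r A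
        · rfl
        · rw [hc] at hfalse; simp at hfalse
      · cases hgm : gMem g A
        · rw [hgm] at hfalse; simp at hfalse
        · rfl
    have hA_reach : Reach g start A := h2 A List.mem_cons_self hcond'.2
    have hmemr' : ∀ x, x ∈ r' ↔ x ∈ r ∨ x = A := fun x => by
      show x ∈ PySem.Set.add r A ↔ _
      rw [PySem.Set.mem_add]
    have hmemw : ∀ x, x ∈ work' ↔ x ∈ rest ∨
        (x ∈ ((gLook g A).getD []).flatten ∧ (gMem g x && !PySem.Set.contains r' x) = true) :=
      fun x => pvMemPush _ _ _ x
    have heq : loopA g r (A :: rest) = loopA g r' work' := by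
      rw [loopA, if_neg hcond]
      rfl
    have hh1 : ∀ x ∈ r', Reach g start x := by
      intro x hx
      rcases (hmemr' x).mp hx with h | rfl
      · exact h1 x h
      · exact hA_reach
    have hh2 : ∀ x ∈ work', gMem g x = true → Reach g start x := by
      intro x hx hg
      rcases (hmemw x).mp hx with h | ⟨hf, _⟩
      · exact h2 x (List.mem_cons_of_mem _ h) hg
      · exact Reach.step hA_reach hf hg
    have hh3 : ∀ A' ∈ r', ∀ s ∈ ((gLook g A').getD []).flatten, gMem g s = true →
        s ∈ r' ∨ s ∈ work' := by
      intro A' hA' s hs hg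
      rcases (hmemr' A').mp hA' with hA'r | rfl
      · rcases h3 A' hA'r s hs hg with h | h
        · exact Or.inl ((hmemr' s).mpr (Or.inl h))
        · rcases List.mem_cons.mp h with rfl | h
          · exact Or.inl ((hmemr' s).mpr (Or.inr rfl))
          · exact Or.inr ((hmemw s).mpr (Or.inl h))
      · by_cases hsr : s ∈ r'
        · exact Or.inl hsr
        · refine Or.inr ((hmemw s).mpr (Or.inr ⟨hs, ?_⟩))
          have hc : PySem.Set.contains r' s = false := by
            cases hcc : PySem.Set.contains r' s
            · rfl
            · exact absurd ((PySem.Set.contains_iff r' s).mp hcc) hsr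
          rw [hg, hc]
          rfl
    have hh4 : gMem g start = true → start ∈ r' ∨ start ∈ work' := by
      intro hg
      rcases h4 hg with h | h
      · exact Or.inl ((hmemr' start).mpr (Or.inl h))
      · rcases List.mem_cons.mp h with rfl | h
        · exact Or.inl ((hmemr' start).mpr (Or.inr rfl))
        · exact Or.inr ((hmemw start).mpr (Or.inl h))
    obtain ⟨c1, c2, c3, c4⟩ := ih hh1 hh2 hh3 hh4
    rw [heq]
    exact ⟨c1, c2, c3, fun x hx => c4 x ((hmemr' x).mpr (Or.inl hx))⟩

theorem loopA_char (g : List (String × List (List String))) (start : String) (x : String) :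
    x ∈ loopA g (PySem.Set.ofList []) [start] ↔ Reach g start x := by
  obtain ⟨s1, s2, s3, _⟩ := loopA_spec g start (PySem.Set.ofList []) [start]
    (fun x hx => by cases hx)
    (fun x hx hg => by rcases List.mem_cons.mp hx with rfl | h; exact Reach.start hg; cases h)
    (fun A hA => by cases hA)
    (fun _ => Or.inr List.mem_cons_self)
  constructor
  · exact s1 x
  · intro hres
    induction hres with
    | start hg => exact s3 hg
    | step hA hs hg ihA => exact s2 _ ihA _ hs hg

-- B's sweep: soundness, and closure at the fixpoint
theorem pvFoldFixPt {α : Type} (f : (PySem.Set String × Bool) → α → (PySem.Set String × Bool))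
    (P : (PySem.Set String × Bool) → α → Prop)
    (hid : ∀ st a, f st a = st ∨ (f st a).2 = true)
    (hflag : ∀ st a, st.2 = true → (f st a).2 = true)
    (hP : ∀ st a, st.2 = false → (f st a).2 = false → P st a)
    (l : List α) (st : PySem.Set String × Bool) (h0 : st.2 = false)
    (h : (l.foldl f st).2 = false) : ∀ a ∈ l, P st a := by
  induction l generalizing st with
  | nil => intro a ha; cases ha
  | cons a l ih =>
    intro b hb
    rw [List.foldl_cons] at h
    have hfa : (f st a).2 = false := by
      cases hfa : (f st a).2
      · rfl
      · rw [pvFoldFlag f hflag l (f st a) hfa] at h; cases h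
    have heq : f st a = st := by
      rcases hid st a with he | ht
      · exact he
      · rw [ht] at hfa; cases hfa
    rcases List.mem_cons.mp hb with rfl | hb
    · exact hP st b h0 hfa
    · rw [heq] at h
      exact ih st h0 h b hb

theorem pvFoldIdent {α : Type} (f : (PySem.Set String × Bool) → α → (PySem.Set String × Bool))
    (hid : ∀ st a, f st a = st ∨ (f st a).2 = true)
    (hflag : ∀ st a, st.2 = true → (f st a).2 = true)
    (l : List α) (st : PySem.Set String × Bool)
    (h : (l.foldl f st).2 = false) : l.foldl f st = st := by
  induction l generalizing st with
  | nil => simp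
  | cons a l ih =>
    rw [List.foldl_cons] at h ⊢
    have hfa : (f st a).2 = false := by
      cases hfa : (f st a).2
      · rfl
      · rw [pvFoldFlag f hflag l (f st a) hfa] at h; cases h
    have heq : f st a = st := by
      rcases hid st a with he | ht
      · exact he
      · rw [ht] at hfa; cases hfa
    rw [heq] at h ⊢
    exact ih st h

theorem pvStepSymId (g : List (String × List (List String))) :
    ∀ (st : PySem.Set String × Bool) (s : String), stepSym g st s = st ∨ (stepSym g st s).2 = true := by
  intro st s
  unfold stepSym
  by_cases hcond : (gMem g s && !PySem.Set.contains st.1 s) = true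
  · rw [if_pos hcond]; exact Or.inr rfl
  · rw [if_neg hcond]; exact Or.inl rfl

theorem pvStepProdId (g : List (String × List (List String))) :
    ∀ (st : PySem.Set String × Bool) (prod : List String),
      prod.foldl (stepSym g) st = st ∨ (prod.foldl (stepSym g) st).2 = true := by
  intro st prod
  by_cases hf : (prod.foldl (stepSym g) st).2 = true
  · exact Or.inr hf
  · exact Or.inl (pvFoldIdent (stepSym g) (pvStepSymId g) (pvStepSymFlag g) prod st (by simpa using hf))

theorem pvStepKeyId (g : List (String × List (List String))) :
    ∀ (st : PySem.Set String × Bool) (A : String),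
      stepKey g st A = st ∨ (stepKey g st A).2 = true := by
  intro st A
  by_cases hf : (stepKey g st A).2 = true
  · exact Or.inr hf
  · exact Or.inl (pvFoldIdent _ (pvStepProdId g) (pvStepProdFlag g) ((gLook g A).getD []) st (by simpa using hf))

theorem pvStepSymFix (g : List (String × List (List String))) :
    ∀ (st : PySem.Set String × Bool) (s : String), st.2 = false → (stepSym g st s).2 = false →
      (gMem g s = true → s ∈ st.1) := by
  intro st s _ h1 hg
  unfold stepSym at h1
  by_cases hcond : (gMem g s && !PySem.Set.contains st.1 s) = true
  · rw [if_pos hcond] at h1; cases h1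
  · have hfalse : (gMem g s && !PySem.Set.contains st.1 s) = false := Bool.eq_false_iff.mpr hcond
    rw [hg] at hfalse
    simp only [Bool.true_and] at hfalse
    apply (PySem.Set.contains_iff st.1 s).mp
    cases hcc : PySem.Set.contains st.1 s
    · rw [hcc] at hfalse; simp at hfalse
    · rfl

theorem pvStepProdFix (g : List (String × List (List String))) :
    ∀ (st : PySem.Set String × Bool) (prod : List String), st.2 = false →
      (prod.foldl (stepSym g) st).2 = false →
      ∀ s ∈ prod, gMem g s = true → s ∈ st.1 :=
  fun st prod h0 h1 =>
    pvFoldFixPt (stepSym g) (fun st s => gMem g s = true → s ∈ st.1)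
      (pvStepSymId g) (pvStepSymFlag g) (pvStepSymFix g) prod st h0 h1

theorem pvStepKeyFix (g : List (String × List (List String))) :
    ∀ (st : PySem.Set String × Bool) (A : String), st.2 = false →
      (stepKey g st A).2 = false →
      ∀ s ∈ ((gLook g A).getD []).flatten, gMem g s = true → s ∈ st.1 := by
  intro st A h0 h1 s hs hg
  rcases List.mem_flatten.mp hs with ⟨prod, hprod, hsprod⟩
  exact pvFoldFixPt _ (fun st prod => ∀ s ∈ prod, gMem g s = true → s ∈ st.1)
    (pvStepProdId g) (pvStepProdFlag g) (pvStepProdFix g)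
    ((gLook g A).getD []) st h0 h1 prod hprod s hsprod hg

theorem sweep_fix (g : List (String × List (List String))) (r : PySem.Set String)
    (h : (sweep g r).2 = false) :
    (sweep g r).1 = r ∧
      ∀ A ∈ r, ∀ s ∈ ((gLook g A).getD []).flatten, gMem g s = true → s ∈ r := by
  constructor
  · have := pvFoldIdent (stepKey g) (pvStepKeyId g) (pvStepKeyFlag g) r (r, false) h
    exact congrArg Prod.fst this
  · intro A hA s hs hg
    exact pvFoldFixPt (stepKey g)
      (fun st A => ∀ s ∈ ((gLook g A).getD []).flatten, gMem g s = true → s ∈ st.1)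
      (pvStepKeyId g) (pvStepKeyFlag g) (pvStepKeyFix g) r (r, false) rfl h A hA s hs hg

theorem pvFoldSoundMem {α : Type} (f : (PySem.Set String × Bool) → α → (PySem.Set String × Bool))
    (Q : String → Prop) :
    ∀ (l : List α),
      (∀ st, (∀ x ∈ st.1, Q x) → ∀ a ∈ l, ∀ x ∈ (f st a).1, Q x) →
      ∀ st, (∀ x ∈ st.1, Q x) → ∀ x ∈ (l.foldl f st).1, Q x := by
  intro l
  induction l with
  | nil => intro _ st h x hx; exact h x (by simpa using hx)
  | cons a l ih =>
    intro hf st h x hx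
    rw [List.foldl_cons] at hx
    exact ih (fun st hst b hb => hf st hst b (List.mem_cons_of_mem _ hb)) (f st a)
      (hf st h a List.mem_cons_self) x hx

theorem pvStepKeySound (g : List (String × List (List String))) (start A : String)
    (hA : Reach g start A) :
    ∀ st, (∀ x ∈ st.1, Reach g start x) → ∀ x ∈ (stepKey g st A).1, Reach g start x := by
  intro st hst
  show ∀ x ∈ (((gLook g A).getD []).foldl (fun st prod => prod.foldl (stepSym g) st) st).1, _
  apply pvFoldSoundMem _ (Reach g start) ((gLook g A).getD []) ?_ st hst
  intro st2 hst2 prod hprod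
  apply pvFoldSoundMem (stepSym g) (Reach g start) prod ?_ st2 hst2
  intro st3 hst3 s hs x hx
  unfold stepSym at hx
  by_cases hcond : (gMem g s && !PySem.Set.contains st3.1 s) = true
  · rw [if_pos hcond] at hx
    rw [PySem.Set.mem_add] at hx
    rcases hx with hx | rfl
    · exact hst3 x hx
    · exact Reach.step hA (List.mem_flatten.mpr ⟨prod, hprod, hs⟩) (Bool.and_eq_true _ _ |>.mp hcond).1
  · rw [if_neg hcond] at hx
    exact hst3 x hx

theorem sweep_sound (g : List (String × List (List String))) (start : String)
    (r : PySem.Set String) (hr : ∀ x ∈ r, Reach g start x) :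
    ∀ x ∈ (sweep g r).1, Reach g start x := by
  show ∀ x ∈ (r.foldl (stepKey g) (r, false)).1, _
  apply pvFoldSoundMem (stepKey g) (Reach g start) r ?_ (r, false) hr
  intro st hst A hA
  exact pvStepKeySound g start A (hr A hA) st hst

theorem loopB_spec (g : List (String × List (List String))) (start : String) :
    ∀ (r : PySem.Set String), (∀ x ∈ r, Reach g start x) →
    (∀ x ∈ r, x ∈ loopB g r) ∧
    (∀ x ∈ loopB g r, Reach g start x) ∧
    (∀ A ∈ loopB g r, ∀ s ∈ ((gLook g A).getD []).flatten, gMem g s = true → s ∈ loopB g r) := by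
  intro r
  induction r using loopB.induct g with
  | case1 r st h ih =>
    intro hr
    have heq : loopB g r = loopB g (sweep g r).1 := by
      rw [loopB]
      exact if_pos h
    obtain ⟨ih1, ih2, ih3⟩ := ih (sweep_sound g start r hr)
    rw [heq]
    exact ⟨fun x hx => ih1 x (pvSweepMono g r x hx), ih2, ih3⟩
  | case2 r st h =>
    intro hr
    have hflag : (sweep g r).2 = false := by
      cases hc : (sweep g r).2
      · rfl
      · exact absurd hc h
    obtain ⟨hfix1, hfix2⟩ := sweep_fix g r hflag
    have heq : loopB g r = (sweep g r).1 := by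
      rw [loopB]
      exact if_neg h
    rw [heq, hfix1]
    exact ⟨fun x hx => hx, hr, hfix2⟩

theorem loopB_char (g : List (String × List (List String))) (start : String) (x : String) :
    x ∈ loopB g (if gMem g start then PySem.Set.ofList [start] else PySem.Set.ofList []) ↔
      Reach g start x := by
  have hr0 : ∀ y ∈ (if gMem g start then PySem.Set.ofList [start] else PySem.Set.ofList []),
      Reach g start y := by
    intro y hy
    by_cases hg : gMem g start = true
    · rw [if_pos hg] at hy
      rcases (PySem.Set.mem_ofList _ _).mp hy with h
      rcases List.mem_singleton.mp h with rfl
      exact Reach.start hg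
    · rw [if_neg hg] at hy
      rcases (PySem.Set.mem_ofList _ _).mp hy with h
      cases h
  obtain ⟨m1, m2, m3⟩ := loopB_spec g start _ hr0
  constructor
  · exact m2 x
  · intro hres
    induction hres with
    | start hg =>
      apply m1
      rw [if_pos hg]
      exact (PySem.Set.mem_ofList _ _).mpr List.mem_cons_self
    | step hA hs hg ihA => exact m3 _ ihA _ hs hg

-- two reachable sets with the same members rebuild the same pruned grammar
theorem rebuild_congr (g : List (String × List (List String))) (S1 S2 : PySem.Set String)
    (h : ∀ x, x ∈ S1 ↔ x ∈ S2) : rebuild g S1 = rebuild g S2 := by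
  have hc : ∀ A, PySem.Set.contains S1 A = PySem.Set.contains S2 A := by
    intro A
    cases h1 : PySem.Set.contains S1 A <;> cases h2 : PySem.Set.contains S2 A
    · rfl
    · rw [← h1, ← h2]
      rw [(PySem.Set.contains_iff S1 A).mpr ((h A).mpr ((PySem.Set.contains_iff S2 A).mp h2))] at h1
      cases h1
    · rw [(PySem.Set.contains_iff S2 A).mpr ((h A).mp ((PySem.Set.contains_iff S1 A).mp h1))] at h2
      cases h2
    · rfl
  have hfun : (fun (pruned : List (String × List (List String))) A =>
      if PySem.Set.contains S1 A then pruned ++ [(A, (gLook g A).getD [])] else pruned) =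
      (fun (pruned : List (String × List (List String))) A =>
      if PySem.Set.contains S2 A then pruned ++ [(A, (gLook g A).getD [])] else pruned) := by
    funext pruned A
    rw [hc A]
  rw [rebuild, rebuild, hfun]

-- ===== VERDICT (by name: the statement is the Claim_ definition above) =====
theorem prune_unreachable_spec : Claim_equal_prune_unreachable := by
  intro g start _
  unfold Spec_prune_unreachable prune_unreachable prune_unreachable_alt
  apply rebuild_congr
  intro x
  rw [loopA_char, loopB_char]
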